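-- pv_equiv track=rewrite | github.com/PearuUu/CKE_Zbor_Zadan_zadanie_praktyczne | 69.py | Z2
-- ===== SOURCE A (Python) =====
-- def znajdz_geny(genotyp):
--     geny = []
--     czy_gen = False
--     for i in range(len(genotyp)-1):
--         if genotyp[i] == "A" and genotyp[i+1] == "A" and czy_gen == False:
--             czy_gen = True
--             gen = ""
--         elif genotyp[i] == "B" and genotyp[i+1] == "B" and czy_gen == True:
--             czy_gen = False
--             gen += "BB"
--             geny.append(gen)
--         if czy_gen:
--             gen += genotyp[i]
--     return geny
--
-- def Z2(genotypy):
--     mutacje = 0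
--     mutacja = "BCDDC"
--     for genotyp in genotypy:
--         geny = znajdz_geny(genotyp)
--         for gen in geny:
--             if mutacja in gen:
--                 mutacje += 1
--                 break
--     return mutacje
-- ===== SOURCE B (Python) =====
-- def Z2(genotypy):
--     mutacje = 0
--     mutacja = "BCDDC"
--     for genotyp in genotypy:
--         s = genotyp
--         while True:
--             a = s.find("AA")
--             if a == -1:
--                 break
--             b = s.find("BB", a + 2)
--             if b == -1:
--                 break
--             if mutacja in s[a:b + 2]:
--                 mutacje += 1
--                 break
--             s = s[b + 2:]
--     return mutacje
-- ===== Notes on version B (the rewrite author's own statement) =====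
-- stated objective: faster
-- what changed: Replaces the per-character state-machine scanner that builds every gene char by char with find()-based jumps: locate the next 'AA' opener and the following 'BB' closer directly, test the mutation on the slice genotyp[a:b+2], and resume scanning after the closed gene.
import Mathlib
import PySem

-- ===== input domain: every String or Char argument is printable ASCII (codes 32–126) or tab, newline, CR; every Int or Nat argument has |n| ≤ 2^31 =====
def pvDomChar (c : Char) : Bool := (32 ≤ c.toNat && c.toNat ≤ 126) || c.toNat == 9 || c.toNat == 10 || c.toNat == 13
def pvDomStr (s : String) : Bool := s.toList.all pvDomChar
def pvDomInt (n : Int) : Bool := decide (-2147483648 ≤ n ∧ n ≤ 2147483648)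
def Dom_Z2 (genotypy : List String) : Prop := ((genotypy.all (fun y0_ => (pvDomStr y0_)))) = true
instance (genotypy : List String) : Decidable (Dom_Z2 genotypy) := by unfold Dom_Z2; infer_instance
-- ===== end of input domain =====

-- B replaces A's per-character state-machine scanner with find()-based jumps to the next
-- 'AA' opener / 'BB' closer and a substring test on the slice (objective: faster, constant factor).

-- ===== PORT A =====

def pvMut : List Char := ['B', 'C', 'D', 'D', 'C']

-- the body of znajdz_geny's for-loop, on the two characters genotyp[i], genotyp[i+1];
-- state = (geny, czy_gen, gen)
def pvF (st : List (List Char) × Bool × List Char) (x y : Char) :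
    List (List Char) × Bool × List Char :=
  let st' :=
    if x = 'A' ∧ y = 'A' ∧ st.2.1 = false then (st.1, true, ([] : List Char))
    else if x = 'B' ∧ y = 'B' ∧ st.2.1 = true then
      (st.1 ++ [st.2.2 ++ ['B', 'B']], false, st.2.2 ++ ['B', 'B'])
    else st
  if st'.2.1 then (st'.1, st'.2.1, st'.2.2 ++ [x]) else st'

def znajdzGenyStep (s : List Char) (st : List (List Char) × Bool × List Char) (i : Int) :
    List (List Char) × Bool × List Char :=
  pvF st (PySem.List.pyGetD s i ' ') (PySem.List.pyGetD s (i + 1) ' ')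

def znajdzGeny (s : List Char) : List (List Char) :=
  ((PySem.List.pyRange 0 (PySem.List.len s - 1) 1).foldl (znajdzGenyStep s)
    ([], false, [])).1

-- 'for gen in geny: if mutacja in gen: mutacje += 1; break'
def przeszukaj (geny : List (List Char)) (mutacje : Int) : Int :=
  match geny with
  | [] => mutacje
  | g :: rest => if PySem.Chars.isIn pvMut g then mutacje + 1 else przeszukaj rest mutacje

def Z2 (genotypy : List String) : Int :=
  genotypy.foldl (fun mutacje genotyp => przeszukaj (znajdzGeny genotyp.toList) mutacje) 0

-- ===== PORT B =====

def pvAA : List Char := ['A', 'A']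
def pvBB : List Char := ['B', 'B']

-- termination facts for petla's while-loop: a successful find of 'BB' from a+2 makes
-- s[b+2:] strictly shorter than s
theorem pv_find_facts (s : List Char) (ha : PySem.Chars.find s pvAA ≠ -1)
    (hb : PySem.Chars.findFrom s pvBB (PySem.Chars.find s pvAA + 2) none ≠ -1) :
    (PySem.Chars.slice s (some (PySem.Chars.findFrom s pvBB (PySem.Chars.find s pvAA + 2) none + 2))
      none).length < s.length := by
  have ha0 : 0 ≤ PySem.Chars.find s pvAA := by
    have := PySem.Chars.neg_one_le_find s pvAA; omega
  obtain ⟨⟨u, hu⟩, -⟩ := PySem.Chars.find_spec (s := s) (sub := pvAA) ha0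
  have hlen : (PySem.Chars.find s pvAA).toNat + 2 ≤ s.length := by
    have h1 := congrArg List.length hu
    rw [List.length_append, List.length_drop] at h1
    have h2 : pvAA.length = 2 := rfl
    omega
  have hcast : PySem.Chars.find s pvAA + 2 =
      (((PySem.Chars.find s pvAA).toNat + 2 : Nat) : Int) := by omega
  rw [hcast] at hb ⊢
  rw [PySem.Chars.findFrom_natCast s pvBB _ (by omega)] at hb ⊢
  set f := PySem.Chars.find (s.drop ((PySem.Chars.find s pvAA).toNat + 2)) pvBB with hf
  by_cases hf1 : f = -1
  · simp [hf1] at hb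
  · rw [if_neg hf1] at hb ⊢
    have hf0 : 0 ≤ f := by
      have := PySem.Chars.neg_one_le_find (s.drop ((PySem.Chars.find s pvAA).toNat + 2)) pvBB
      rw [← hf] at this; omega
    rw [PySem.Chars.slice_eq_listSlice]
    rw [PySem.List.slice_from s (show (0 : Int) ≤ (((PySem.Chars.find s pvAA).toNat + 2 : Nat) : Int) + f + 2 by omega)]
    rw [List.length_drop]
    omega

-- the while-loop of B: find the next gene by jumps, test the mutation on the slice
def petla (s : List Char) (mutacje : Int) : Int :=
  let a := PySem.Chars.find s pvAA
  if _ha : a = -1 then mutacje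
  else
    let b := PySem.Chars.findFrom s pvBB (a + 2) none
    if _hb : b = -1 then mutacje
    else if PySem.Chars.isIn pvMut (PySem.Chars.slice s (some a) (some (b + 2))) then
      mutacje + 1
    else petla (PySem.Chars.slice s (some (b + 2)) none) mutacje
termination_by s.length
decreasing_by exact pv_find_facts s _ha _hb

def Z2_alt (genotypy : List String) : Int :=
  genotypy.foldl (fun mutacje genotyp => petla genotyp.toList mutacje) 0

-- ===== PRECONDITION & SPEC =====
def Spec_Z2 (genotypy : List String) (out : Int) : Prop := out = Z2_alt genotypy
instance (genotypy : List String) (out : Int) : Decidable (Spec_Z2 genotypy out) := by unfold Spec_Z2; infer_instance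

-- ===== CLAIM (what is proved, stated in full; the proofs are below) =====
def Claim_equal_Z2 : Prop := ∀ (genotypy : List String), Dom_Z2 genotypy → Spec_Z2 genotypy (Z2 genotypy)

-- ===== LEMMAS AND PROOFS =====

-- the reference gene parser both ports are reduced to
mutual
def pvGenes : List Char → List (List Char)
  | x :: y :: r => if x = 'A' ∧ y = 'A' then pvInGene [x] (y :: r) else pvGenes (y :: r)
  | _ => []
  termination_by s => s.length
def pvInGene (acc : List Char) : List Char → List (List Char)
  | x :: y :: r =>
      if x = 'B' ∧ y = 'B' then (acc ++ ['B', 'B']) :: pvGenes (y :: r)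
      else pvInGene (acc ++ [x]) (y :: r)
  | _ => []
  termination_by s => s.length
end

-- A-side: the indexed fold is the pairwise fold
def pvPairFold (st : List (List Char) × Bool × List Char) :
    List Char → List (List Char) × Bool × List Char
  | x :: y :: r => pvPairFold (pvF st x y) (y :: r)
  | _ => st

theorem pvPairFold_short (st : List (List Char) × Bool × List Char) (t : List Char)
    (h : t.length ≤ 1) : pvPairFold st t = st := by
  match t with
  | [] => rfl
  | [x] => rfl
  | x :: y :: r => simp at h

theorem pv_fold_eq_pairs_aux (s : List Char) (j : Nat) :
    ∀ (k : Nat), s.length - k ≤ j → ∀ st,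
      (PySem.List.pyRange (k : Int) (PySem.List.len s - 1) 1).foldl (znajdzGenyStep s) st =
        pvPairFold st (s.drop k) := by
  induction j with
  | zero =>
      intro k hk st
      have h1 : s.length ≤ k := by omega
      rw [PySem.List.pyRange_one_eq_nil (by simp; omega)]
      rw [pvPairFold_short st _ (by simp; omega)]
      rfl
  | succ j ih =>
      intro k hk st
      by_cases h : k + 1 < s.length
      · have hcons := PySem.List.pyRange_one_cons
          (show (k : Int) < PySem.List.len s - 1 by simp; omega)
        rw [hcons]
        simp only [List.foldl_cons]
        have hstep : znajdzGenyStep s st (k : Int) = pvF st s[k] s[k + 1] := by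
          unfold znajdzGenyStep
          rw [PySem.List.pyGetD_ofNat s k ' ' (by omega)]
          rw [show ((k : Int) + 1) = ((k + 1 : Nat) : Int) by push_cast; ring]
          rw [PySem.List.pyGetD_ofNat s (k + 1) ' ' (by omega)]
        rw [hstep]
        rw [show ((k : Int) + 1) = ((k + 1 : Nat) : Int) by push_cast; ring]
        rw [ih (k + 1) (by omega) (pvF st s[k] s[k + 1])]
        rw [List.drop_eq_getElem_cons (show k < s.length by omega)]
        rw [List.drop_eq_getElem_cons (show k + 1 < s.length by omega)]
        rw [pvPairFold]
      · rw [PySem.List.pyRange_one_eq_nil (by simp; omega)]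
        rw [pvPairFold_short st _ (by simp; omega)]
        rfl

theorem pv_fold_eq_pairs (s : List Char) (k : Nat) (st : List (List Char) × Bool × List Char) :
    (PySem.List.pyRange (k : Int) (PySem.List.len s - 1) 1).foldl (znajdzGenyStep s) st =
      pvPairFold st (s.drop k) :=
  pv_fold_eq_pairs_aux s (s.length - k) k le_rfl st

theorem pvPairFold_genes (n : Nat) :
    ∀ s : List Char, s.length ≤ n →
      (∀ geny gen, (pvPairFold (geny, false, gen) s).1 = geny ++ pvGenes s) ∧
      (∀ geny acc, (pvPairFold (geny, true, acc) s).1 = geny ++ pvInGene acc s) := by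
  induction n with
  | zero =>
      intro s hs
      match s with
      | [] => constructor <;> intro geny g <;> simp [pvPairFold, pvGenes, pvInGene]
      | x :: t => simp at hs
  | succ n ih =>
      intro s hs
      match s with
      | [] => constructor <;> intro geny g <;> simp [pvPairFold, pvGenes, pvInGene]
      | [x] => constructor <;> intro geny g <;> simp [pvPairFold, pvGenes, pvInGene]
      | x :: y :: r =>
          have hr := ih (y :: r) (by simp at hs ⊢; omega)
          constructor
          · intro geny gen
            by_cases hA : x = 'A' ∧ y = 'A'
            · obtain ⟨hx, hy⟩ := hA; subst hx; subst hy
              have hF : pvF (geny, false, gen) 'A' 'A' = (geny, true, ['A']) := by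
                simp [pvF]
              rw [pvPairFold, hF, (hr.2 geny ['A'] : _)]
              simp [pvGenes]
            · have hF : pvF (geny, false, gen) x y = (geny, false, gen) := by
                simp only [pvF]
                simp [hA]
              rw [pvPairFold, hF, (hr.1 geny gen : _)]
              have : pvGenes (x :: y :: r) = pvGenes (y :: r) := by
                rw [pvGenes]; simp [hA]
              rw [this]
          · intro geny acc
            by_cases hB : x = 'B' ∧ y = 'B'
            · obtain ⟨hx, hy⟩ := hB; subst hx; subst hy
              have hF : pvF (geny, true, acc) 'B' 'B' =
                  (geny ++ [acc ++ ['B', 'B']], false, acc ++ ['B', 'B']) := by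
                simp [pvF]
              rw [pvPairFold, hF, (hr.1 (geny ++ [acc ++ ['B', 'B']]) (acc ++ ['B', 'B']) : _)]
              rw [pvInGene]
              simp
            · have hF : pvF (geny, true, acc) x y = (geny, true, acc ++ [x]) := by
                simp only [pvF]
                simp [hB]
              rw [pvPairFold, hF, (hr.2 geny (acc ++ [x]) : _)]
              have : pvInGene acc (x :: y :: r) = pvInGene (acc ++ [x]) (y :: r) := by
                rw [pvInGene]; simp [hB]
              rw [this]

theorem znajdzGeny_eq (s : List Char) : znajdzGeny s = pvGenes s := by
  unfold znajdzGeny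
  rw [show (0 : Int) = ((0 : Nat) : Int) by norm_num]
  rw [pv_fold_eq_pairs s 0 ([], false, [])]
  rw [List.drop_zero]
  exact (pvPairFold_genes s.length s le_rfl).1 [] []

theorem przeszukaj_eq (geny : List (List Char)) (m : Int) :
    przeszukaj geny m = if geny.any (fun g => PySem.Chars.isIn pvMut g) then m + 1 else m := by
  induction geny with
  | nil => simp [przeszukaj]
  | cons g rest ih =>
      by_cases h : PySem.Chars.isIn pvMut g
      · simp [przeszukaj, h]
      · simp [przeszukaj, h, ih]

-- B-side helper lemmas
theorem pvGenes_skip (k : Nat) :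
    ∀ s : List Char, (∀ i, i < k → ¬ (pvAA <+: s.drop i)) → pvGenes s = pvGenes (s.drop k) := by
  induction k with
  | zero => intro s _; rw [List.drop_zero]
  | succ k ih =>
      intro s h
      match s with
      | [] => simp
      | [x] =>
          have h1 : List.drop (k + 1) [x] = [] := by
            apply List.drop_eq_nil_of_le; simp
          rw [h1]; simp [pvGenes]
      | x :: y :: r =>
          have h0 := h 0 (by omega)
          rw [List.drop_zero] at h0
          have hxy : ¬ (x = 'A' ∧ y = 'A') := by
            intro ⟨hx, hy⟩
            exact h0 (by simp [pvAA, hx, hy, List.cons_prefix_cons])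
          have hstep : pvGenes (x :: y :: r) = pvGenes (y :: r) := by
            rw [pvGenes]; simp [hxy]
          rw [hstep, List.drop_succ_cons]
          exact ih (y :: r) (fun i hi => h (i + 1) (by omega))

theorem pvGenes_none (s : List Char) (h : ∀ j, ¬ (pvAA <+: s.drop j)) : pvGenes s = [] := by
  rw [pvGenes_skip s.length s (fun i _ => h i), List.drop_length]
  simp [pvGenes]

theorem pvInGene_skip (k : Nat) :
    ∀ (t : List Char) (acc : List Char), (∀ i, i < k → ¬ (pvBB <+: t.drop i)) →
      pvInGene acc t = pvInGene (acc ++ t.take k) (t.drop k) := by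
  induction k with
  | zero => intro t acc _; simp
  | succ k ih =>
      intro t acc h
      match t with
      | [] => simp
      | [x] =>
          have h1 : List.drop (k + 1) [x] = [] := by
            apply List.drop_eq_nil_of_le; simp
          rw [h1]; simp [pvInGene]
      | x :: y :: r =>
          have h0 := h 0 (by omega)
          rw [List.drop_zero] at h0
          have hxy : ¬ (x = 'B' ∧ y = 'B') := by
            intro ⟨hx, hy⟩
            exact h0 (by simp [pvBB, hx, hy, List.cons_prefix_cons])
          have hstep : pvInGene acc (x :: y :: r) = pvInGene (acc ++ [x]) (y :: r) := by
            rw [pvInGene]; simp [hxy]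
          rw [hstep, List.drop_succ_cons, List.take_succ_cons]
          rw [ih (y :: r) (acc ++ [x]) (fun i hi => h (i + 1) (by omega))]
          simp

theorem pvInGene_none (t : List Char) (h : ∀ j, ¬ (pvBB <+: t.drop j)) :
    ∀ acc, pvInGene acc t = [] := by
  intro acc
  rw [pvInGene_skip t.length t acc (fun i _ => h i), List.drop_length]
  simp [pvInGene]

theorem pv_no_prefix_of_find_neg (u sub : List Char) (h : PySem.Chars.find u sub = -1) :
    ∀ j, ¬ (sub <+: u.drop j) := by
  intro j hj
  have h1 : PySem.Chars.isIn sub u = true :=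
    (PySem.Chars.exists_prefix_drop_iff_isIn sub u).mp ⟨j, hj⟩
  rw [PySem.Chars.isIn_iff_infix] at h1
  exact ((PySem.Chars.find_eq_neg_one_iff u sub).mp h) h1

theorem pvGenes_consB (v : List Char) : pvGenes ('B' :: v) = pvGenes v := by
  match v with
  | [] => simp [pvGenes]
  | y :: r => rw [pvGenes]; simp

theorem petla_eq (n : Nat) : ∀ s : List Char, s.length ≤ n → ∀ m : Int,
    petla s m = if (pvGenes s).any (fun g => PySem.Chars.isIn pvMut g) then m + 1 else m := by
  induction n with
  | zero =>
      intro s hs m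
      have hnil : s = [] := by rw [← List.length_eq_zero_iff]; omega
      subst hnil
      rw [petla]
      have hfind : PySem.Chars.find [] pvAA = -1 := by decide
      simp [hfind, pvGenes]
  | succ n ih =>
      intro s hs m
      rw [petla]
      by_cases ha : PySem.Chars.find s pvAA = -1
      · rw [dif_pos ha]
        rw [pvGenes_none s (pv_no_prefix_of_find_neg s pvAA ha)]
        simp
      · rw [dif_neg ha]
        have ha0 : 0 ≤ PySem.Chars.find s pvAA := by
          have := PySem.Chars.neg_one_le_find s pvAA; omega
        obtain ⟨⟨u, hu⟩, hmin⟩ := PySem.Chars.find_spec (s := s) (sub := pvAA) ha0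
        set a : Nat := (PySem.Chars.find s pvAA).toNat with hadef
        have hu' : s.drop a = 'A' :: 'A' :: u := by rw [← hu]; rfl
        have hlen : a + 2 ≤ s.length := by
          have h1 := congrArg List.length hu'
          rw [List.length_drop] at h1
          simp at h1
          omega
        have hu2 : s.drop (a + 2) = u := by
          have h2 : ('A' :: 'A' :: u).drop 2 = u := rfl
          rw [← hu', List.drop_drop] at h2
          exact h2
        have hskip : pvGenes s = pvInGene ['A'] ('A' :: u) := by
          rw [pvGenes_skip a s (fun i hi => hmin i hi), hu']
          rw [pvGenes]; simp
        have hcast2 : PySem.Chars.find s pvAA + 2 = ((a + 2 : Nat) : Int) := by omega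
        rw [hcast2, PySem.Chars.findFrom_natCast s pvBB (a + 2) hlen, hu2]
        by_cases hf : PySem.Chars.find u pvBB = -1
        · rw [if_pos hf, dif_pos rfl]
          have hnone : pvInGene ['A'] ('A' :: u) = [] := by
            apply pvInGene_none
            intro j
            match j with
            | 0 =>
                simp [pvBB, List.cons_prefix_cons]
            | j + 1 =>
                rw [List.drop_succ_cons]
                exact pv_no_prefix_of_find_neg u pvBB hf j
          rw [hskip, hnone]
          simp
        · rw [if_neg hf]
          have hf0 : 0 ≤ PySem.Chars.find u pvBB := by
            have := PySem.Chars.neg_one_le_find u pvBB; omega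
          obtain ⟨⟨v, hv⟩, hminB⟩ := PySem.Chars.find_spec (s := u) (sub := pvBB) hf0
          set fn : Nat := (PySem.Chars.find u pvBB).toNat with hfndef
          have hv' : u.drop fn = 'B' :: 'B' :: v := by rw [← hv]; rfl
          have hbne : ¬ (((a + 2 : Nat) : Int) + PySem.Chars.find u pvBB = -1) := by
            push_cast
            omega
          rw [dif_neg hbne]
          -- the gene the parser closes here
          have hwalk : pvInGene ['A'] ('A' :: u) =
              (('A' :: 'A' :: u.take fn) ++ ['B', 'B']) :: pvGenes ('B' :: v) := by
            rw [pvInGene_skip (fn + 1) ('A' :: u) ['A'] ?_]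
            · rw [List.drop_succ_cons, hv', List.take_succ_cons]
              rw [pvInGene]
              simp
            · intro i hi
              match i with
              | 0 => simp [pvBB, List.cons_prefix_cons]
              | j + 1 =>
                  rw [List.drop_succ_cons]
                  exact hminB j (by omega)
          have hulen : fn + 2 ≤ u.length := by
            have h1 := congrArg List.length hv'
            rw [List.length_drop] at h1
            simp at h1
            omega
          have htake : u.take (fn + 2) = u.take fn ++ ['B', 'B'] := by
            rw [List.take_add, hv']
            rfl
          have hslice : PySem.Chars.slice s (some (PySem.Chars.find s pvAA))
              (some (((a + 2 : Nat) : Int) + PySem.Chars.find u pvBB + 2)) =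
              ('A' :: 'A' :: u.take fn) ++ ['B', 'B'] := by
            have hcasta : PySem.Chars.find s pvAA = ((a : Nat) : Int) := by omega
            have hcastb : ((a + 2 : Nat) : Int) + PySem.Chars.find u pvBB + 2 =
                ((a + fn + 4 : Nat) : Int) := by push_cast; omega
            rw [hcasta, hcastb, PySem.Chars.slice_eq_listSlice,
              PySem.List.slice_natCast s a (a + fn + 4)]
            have h4 : a + fn + 4 - a = fn + 4 := by omega
            rw [h4, hu']
            rw [show fn + 4 = (fn + 2) + 1 + 1 by omega]
            rw [List.take_succ_cons, List.take_succ_cons, htake]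
            simp
          rw [hslice]
          have hdropv : s.drop (a + fn + 4) = v := by
            have h2 : u.drop (fn + 2) = v := by
              have h3 : ('B' :: 'B' :: v).drop 2 = v := rfl
              rw [← hv', List.drop_drop] at h3
              exact h3
            rw [← hu2, List.drop_drop] at h2
            rw [show a + fn + 4 = a + 2 + (fn + 2) by omega]
            exact h2
          by_cases hmutg : PySem.Chars.isIn pvMut (('A' :: 'A' :: u.take fn) ++ ['B', 'B']) = true
          · rw [if_pos hmutg, hskip, hwalk]
            have hany : ((('A' :: 'A' :: List.take fn u ++ ['B', 'B']) :: pvGenes ('B' :: v)).any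
                (fun g => PySem.Chars.isIn pvMut g)) = true := by
              have hmutg' : PySem.Chars.isIn pvMut
                  ('A' :: 'A' :: (List.take fn u ++ ['B', 'B'])) = true := by
                simpa using hmutg
              simp [List.any_cons, hmutg']
            rw [if_pos hany]
          · rw [if_neg hmutg]
            have hslice2 : PySem.Chars.slice s
                (some (((a + 2 : Nat) : Int) + PySem.Chars.find u pvBB + 2)) none = v := by
              have hcastb : ((a + 2 : Nat) : Int) + PySem.Chars.find u pvBB + 2 =
                  ((a + fn + 4 : Nat) : Int) := by push_cast; omega
              rw [hcastb, PySem.Chars.slice_eq_listSlice,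
                PySem.List.slice_from_natCast s (a + fn + 4), hdropv]
            rw [hslice2]
            have hvlen : v.length ≤ n := by
              have h1 := congrArg List.length hdropv
              rw [List.length_drop] at h1
              omega
            rw [ih v hvlen m, hskip, hwalk, pvGenes_consB]
            have hany : ((('A' :: 'A' :: List.take fn u ++ ['B', 'B']) :: pvGenes v).any
                (fun g => PySem.Chars.isIn pvMut g)) =
                ((pvGenes v).any (fun g => PySem.Chars.isIn pvMut g)) := by
              have hmutg' : ¬ PySem.Chars.isIn pvMut
                  ('A' :: 'A' :: (List.take fn u ++ ['B', 'B'])) = true := by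
                simpa using hmutg
              simp [List.any_cons, hmutg']
            rw [hany]

-- ===== VERDICT (by name: the statement is the Claim_ definition above) =====
theorem Z2_spec : Claim_equal_Z2 := by
  intro genotypy _
  unfold Spec_Z2 Z2 Z2_alt
  refine PySem.List.foldl_congr_mem _ _ _ _ (fun m g _ => ?_)
  rw [przeszukaj_eq, znajdzGeny_eq, petla_eq g.toList.length g.toList le_rfl m]
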